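-- pv_equiv track=rewrite | github.com/Assael1/Yahtzi | logic.py | common_to_end
-- ===== SOURCE A (Python) =====
-- def common_to_end(dice):
--     common = 0
--     number = -1
--     for i in range(1, 7):
--         counter = 0
--         for j in dice:
--             if i == j[0]:
--                 counter += 1
--         if common <= counter:
--             common = counter
--             number = i
--     return number
-- ===== SOURCE B (Python) =====
-- def common_to_end(dice):
--     cnt = {}
--     for face, _ in dice:
--         cnt[face] = cnt.get(face, 0) + 1
--     return max(range(1, 7), key=lambda i: (cnt.get(i, 0), i))
-- ===== Notes on version B (the rewrite author's own statement) =====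
-- stated objective: faster
-- what changed: Replaces A's nested loops (six rescans of the dice plus a manual best-so-far selection loop) with a single counting pass into a dict followed by one builtin max over faces 1..6 under the lexicographic key (count, face), which reproduces A's tie-break toward the higher face and the empty-input result 6.
import Mathlib
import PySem

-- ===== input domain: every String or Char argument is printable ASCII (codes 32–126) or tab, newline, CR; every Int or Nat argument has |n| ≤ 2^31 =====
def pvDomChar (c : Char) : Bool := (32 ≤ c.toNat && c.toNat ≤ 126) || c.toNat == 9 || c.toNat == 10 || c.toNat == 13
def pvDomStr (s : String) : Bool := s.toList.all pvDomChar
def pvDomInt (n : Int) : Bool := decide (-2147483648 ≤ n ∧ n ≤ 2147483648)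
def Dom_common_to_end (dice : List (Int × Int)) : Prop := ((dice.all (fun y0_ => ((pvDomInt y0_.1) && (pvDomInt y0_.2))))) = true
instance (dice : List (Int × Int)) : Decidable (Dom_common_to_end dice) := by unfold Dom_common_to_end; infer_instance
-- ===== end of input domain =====

-- B counts the faces into a dict in one pass and picks the answer with max over faces 1..6
-- under the lexicographic key (count, face), instead of A's six rescans with a manual best-so-far loop.

-- ===== PORT A =====
def common_to_end (dice : List (Int × Int)) : Int :=
  ((PySem.List.pyRange 1 7 1).foldl (fun (s : Int × Int) i =>
    let counter : Int := dice.foldl (fun c j => if i == j.1 then c + 1 else c) 0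
    if s.1 ≤ counter then (counter, i) else s) (0, -1)).2

-- ===== PORT B =====
def common_to_end_alt (dice : List (Int × Int)) : Int :=
  let cnt : PySem.Dict Int Int :=
    dice.foldl (fun d j => d.insert j.1 (d.getD j.1 0 + 1)) PySem.Dict.empty
  match PySem.List.max2? (PySem.List.pyRange 1 7 1) (fun i => cnt.getD i 0) (fun i => i) with
  | some m => m
  | none => 0  -- unreachable: range(1, 7) is nonempty, so Python's max never raises here

-- ===== PRECONDITION & SPEC =====
def Spec_common_to_end (dice : List (Int × Int)) (out : Int) : Prop := out = common_to_end_alt dice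
instance (dice : List (Int × Int)) (out : Int) : Decidable (Spec_common_to_end dice out) := by unfold Spec_common_to_end; infer_instance

-- ===== CLAIM (what is proved, stated in full; the proofs are below) =====
def Claim_equal_common_to_end : Prop := ∀ (dice : List (Int × Int)), Dom_common_to_end dice → Spec_common_to_end dice (common_to_end dice)

-- ===== LEMMAS AND PROOFS =====

-- A's running count of face i over the dice equals B's frequency-dict entry for i.
lemma fold_pair_inv (dice : List (Int × Int)) (i : Int) (c0 : Int) (d : PySem.Dict Int Int)
    (h : c0 = d.getD i 0) :
    dice.foldl (fun c j => if i == j.1 then c + 1 else c) c0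
      = (dice.foldl (fun d j => d.insert j.1 (d.getD j.1 0 + 1)) d).getD i 0 := by
  induction dice generalizing c0 d with
  | nil => simpa using h
  | cons j t ih =>
    simp only [List.foldl_cons]
    apply ih
    by_cases hj : i = j.1
    · subst hj; simp [h, PySem.Dict.getD_insert_self]
    · simp [PySem.Dict.getD_insert, hj, h]

-- Every count in the frequency dict is nonnegative.
lemma cnt_nonneg (dice : List (Int × Int)) (d : PySem.Dict Int Int)
    (h : ∀ i, 0 ≤ d.getD i 0) (i : Int) :
    0 ≤ (dice.foldl (fun d j => d.insert j.1 (d.getD j.1 0 + 1)) d).getD i 0 := by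
  induction dice generalizing d with
  | nil => exact h i
  | cons j t ih =>
    simp only [List.foldl_cons]
    apply ih
    intro k
    by_cases hk : k = j.1
    · subst hk; simp only [PySem.Dict.getD_insert_self]; have := h j.1; omega
    · simp [PySem.Dict.getD_insert, hk]; exact h k

-- Step lock: A's best-so-far fold seeded at face m computes exactly the element max2? picks
-- on m :: fs, because over a strictly increasing face list the lexicographic "replace" condition
-- collapses to A's `common ≤ counter`.
lemma sel_inv (f : Int → Int) (fs : List Int) (m : Int)
    (hm : ∀ i ∈ fs, m < i) (hp : List.Pairwise (· < ·) fs) :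
    ∃ k, PySem.List.max2? (m :: fs) (fun i => f i) (fun i => i) = some k
      ∧ fs.foldl (fun (s : Int × Int) i => if s.1 ≤ f i then (f i, i) else s) (f m, m) = (f k, k) := by
  induction fs generalizing m with
  | nil => exact ⟨m, rfl, rfl⟩
  | cons i t ih =>
    have hmi : m < i := hm i (by simp)
    have hp' : List.Pairwise (· < ·) t := hp.tail
    simp only [PySem.List.max2?, List.foldl_cons] at ih ⊢
    by_cases h : f m ≤ f i
    · have hc : (decide (f m < f i) || !decide (f i < f m) && decide (m < i)) = true := by
        simp only [Bool.or_eq_true, Bool.and_eq_true, Bool.not_eq_true', decide_eq_true_eq,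
          decide_eq_false_iff_not]
        omega
      rw [if_pos hc, if_pos h]
      exact ih i (fun j hj => (List.pairwise_cons.mp hp).1 j hj) hp'
    · have hc : ¬ ((decide (f m < f i) || !decide (f i < f m) && decide (m < i)) = true) := by
        simp only [Bool.or_eq_true, Bool.and_eq_true, Bool.not_eq_true', decide_eq_true_eq,
          decide_eq_false_iff_not]
        omega
      rw [if_neg hc, if_neg h]
      exact ih m (fun j hj => hm j (List.mem_cons_of_mem _ hj)) hp'

-- ===== VERDICT (by name: the statement is the Claim_ definition above) =====
set_option maxHeartbeats 1000000 in
theorem common_to_end_spec : Claim_equal_common_to_end := by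
  intro dice _
  unfold Spec_common_to_end common_to_end common_to_end_alt
  have hr : PySem.List.pyRange 1 7 1 = [1, 2, 3, 4, 5, 6] := by decide
  simp only [hr]
  have hc : ∀ i : Int, dice.foldl (fun c j => if i == j.1 then c + 1 else c) (0 : Int)
      = (dice.foldl (fun d j => d.insert j.1 (d.getD j.1 0 + 1))
          (PySem.Dict.empty : PySem.Dict Int Int)).getD i 0 :=
    fun i => fold_pair_inv dice i 0 PySem.Dict.empty (by simp)
  simp only [hc]
  have hn1 : (0 : Int) ≤ (dice.foldl (fun d j => d.insert j.1 (d.getD j.1 0 + 1))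
      (PySem.Dict.empty : PySem.Dict Int Int)).getD 1 0 :=
    cnt_nonneg dice PySem.Dict.empty (by intro i; simp) 1
  generalize hD : (dice.foldl (fun d j => d.insert j.1 (d.getD j.1 0 + 1))
      (PySem.Dict.empty : PySem.Dict Int Int)) = D at hn1 ⊢
  obtain ⟨k, hB, hA⟩ := sel_inv (fun i => D.getD i 0) [2, 3, 4, 5, 6] 1 (by decide) (by decide)
  simp only [List.foldl_cons] at hA hB ⊢
  rw [if_pos hn1, hA, hB]
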